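-- pv_equiv track=rewrite | github.com/e-trees/e7awg_sw | e7awgsw/feedback/dspmodule.py | classification
-- ===== SOURCE A (Python) =====
-- def classification(
--     i_sample_list, q_sample_list, decision_func_params_0, decision_func_params_1):
--     result = []
--     a0, b0, c0 = decision_func_params_0
--     a1, b1, c1 = decision_func_params_1
--     for i in range(len(i_sample_list)):
--         i_val = i_sample_list[i]
--         q_val = q_sample_list[i]
--         res_0 = a0 * i_val + b0 * q_val + c0
--         res_1 = a1 * i_val + b1 * q_val + c1
--         if (res_0 >= 0) and (res_1 >= 0):
--             result.append(0)
--         elif (res_0 >= 0) and (res_1 < 0):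
--             result.append(1)
--         elif (res_0 < 0) and (res_1 >= 0):
--             result.append(2)
--         elif (res_0 < 0) and (res_1 < 0):
--             result.append(3)
--     return result
-- ===== SOURCE B (Python) =====
-- def classification(
--     i_sample_list, q_sample_list, decision_func_params_0, decision_func_params_1):
--     def negatives(params):
--         a, b, c = params
--         return [a * i_sample_list[k] + b * q_sample_list[k] + c < 0
--                 for k in range(len(i_sample_list))]
--     return [2 * hi + lo for hi, lo in zip(negatives(decision_func_params_0),
--                                           negatives(decision_func_params_1))]
-- ===== Notes on version B (the rewrite author's own statement) =====
-- stated objective: simpler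
-- what changed: Replaces the four-way if/elif cascade inside one accumulating loop by two sign-bit passes (one list of 'decision function < 0' booleans per parameter set) zipped and combined arithmetically as 2*hi + lo.
import Mathlib
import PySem

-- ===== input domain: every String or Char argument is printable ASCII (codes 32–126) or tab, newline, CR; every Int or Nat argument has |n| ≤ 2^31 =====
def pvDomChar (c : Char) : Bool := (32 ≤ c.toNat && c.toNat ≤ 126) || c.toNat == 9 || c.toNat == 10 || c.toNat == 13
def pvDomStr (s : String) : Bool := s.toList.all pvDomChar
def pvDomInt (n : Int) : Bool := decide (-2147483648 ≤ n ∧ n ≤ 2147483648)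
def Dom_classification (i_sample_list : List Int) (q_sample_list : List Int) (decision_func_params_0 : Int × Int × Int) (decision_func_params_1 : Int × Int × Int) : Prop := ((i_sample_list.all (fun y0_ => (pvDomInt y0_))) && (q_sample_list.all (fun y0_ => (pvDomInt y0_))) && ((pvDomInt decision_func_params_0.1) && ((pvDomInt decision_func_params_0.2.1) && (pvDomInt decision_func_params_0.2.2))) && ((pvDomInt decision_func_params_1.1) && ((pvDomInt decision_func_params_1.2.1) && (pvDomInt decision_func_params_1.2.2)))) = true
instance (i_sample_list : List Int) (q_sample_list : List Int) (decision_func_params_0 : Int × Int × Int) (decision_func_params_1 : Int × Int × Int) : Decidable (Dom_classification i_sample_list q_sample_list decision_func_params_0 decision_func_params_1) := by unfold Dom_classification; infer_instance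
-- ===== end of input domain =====

-- B replaces A's four-way if/elif cascade in one accumulating loop by two sign-bit
-- passes zipped and combined arithmetically (objective: simpler).

-- ===== PORT A =====
-- literal transliteration of A: one loop over range(len(i_sample_list)) appending via
-- a four-way branch; out-of-range q lookup (an IndexError in Python) is excluded by Pre_.
def classification (i_sample_list : List Int) (q_sample_list : List Int) (decision_func_params_0 : Int × Int × Int) (decision_func_params_1 : Int × Int × Int) : List Int :=
  let a0 := decision_func_params_0.1
  let b0 := decision_func_params_0.2.1
  let c0 := decision_func_params_0.2.2
  let a1 := decision_func_params_1.1
  let b1 := decision_func_params_1.2.1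
  let c1 := decision_func_params_1.2.2
  (PySem.List.pyRange 0 i_sample_list.length 1).foldl
    (fun result i =>
      let i_val := (PySem.List.pyGet? i_sample_list i).getD 0
      let q_val := (PySem.List.pyGet? q_sample_list i).getD 0
      let res_0 := a0 * i_val + b0 * q_val + c0
      let res_1 := a1 * i_val + b1 * q_val + c1
      if res_0 ≥ 0 ∧ res_1 ≥ 0 then result ++ [0]
      else if res_0 ≥ 0 ∧ res_1 < 0 then result ++ [1]
      else if res_0 < 0 ∧ res_1 ≥ 0 then result ++ [2]
      else if res_0 < 0 ∧ res_1 < 0 then result ++ [3]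
      else result) []

-- ===== PORT B =====
-- helper 'negatives' of Source B: the list of booleans 'decision function < 0'
def pvNegatives (i_sample_list : List Int) (q_sample_list : List Int) (params : Int × Int × Int) : List Bool :=
  let a := params.1
  let b := params.2.1
  let c := params.2.2
  (PySem.List.pyRange 0 i_sample_list.length 1).map
    (fun k => decide (a * (PySem.List.pyGet? i_sample_list k).getD 0
                    + b * (PySem.List.pyGet? q_sample_list k).getD 0 + c < 0))

def classification_alt (i_sample_list : List Int) (q_sample_list : List Int) (decision_func_params_0 : Int × Int × Int) (decision_func_params_1 : Int × Int × Int) : List Int :=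
  ((pvNegatives i_sample_list q_sample_list decision_func_params_0).zip
   (pvNegatives i_sample_list q_sample_list decision_func_params_1)).map
    (fun p => 2 * (if p.1 then 1 else 0) + (if p.2 then 1 else 0))

-- ===== PRECONDITION & SPEC =====
-- A raises IndexError (and B raises the same) when q_sample_list is shorter than
-- i_sample_list; exactly those inputs are excluded.
def Pre_classification (i_sample_list : List Int) (q_sample_list : List Int) (decision_func_params_0 : Int × Int × Int) (decision_func_params_1 : Int × Int × Int) : Prop :=
  i_sample_list.length ≤ q_sample_list.length
instance (i_sample_list : List Int) (q_sample_list : List Int) (decision_func_params_0 : Int × Int × Int) (decision_func_params_1 : Int × Int × Int) : Decidable (Pre_classification i_sample_list q_sample_list decision_func_params_0 decision_func_params_1) := by unfold Pre_classification; infer_instance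

def pvWitness_classification : List Int × List Int × (Int × Int × Int) × (Int × Int × Int) :=
  ([1, -2, 0], [3, 1, -1], (1, 1, 0), (1, -1, 1))

def Spec_classification (i_sample_list : List Int) (q_sample_list : List Int) (decision_func_params_0 : Int × Int × Int) (decision_func_params_1 : Int × Int × Int) (out : List Int) : Prop := out = classification_alt i_sample_list q_sample_list decision_func_params_0 decision_func_params_1
instance (i_sample_list : List Int) (q_sample_list : List Int) (decision_func_params_0 : Int × Int × Int) (decision_func_params_1 : Int × Int × Int) (out : List Int) : Decidable (Spec_classification i_sample_list q_sample_list decision_func_params_0 decision_func_params_1 out) := by unfold Spec_classification; infer_instance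

-- ===== CLAIM (what is proved, stated in full; the proofs are below) =====
def Claim_equal_classification : Prop := ∀ (i_sample_list : List Int) (q_sample_list : List Int) (decision_func_params_0 : Int × Int × Int) (decision_func_params_1 : Int × Int × Int), Dom_classification i_sample_list q_sample_list decision_func_params_0 decision_func_params_1 → Pre_classification i_sample_list q_sample_list decision_func_params_0 decision_func_params_1 → Spec_classification i_sample_list q_sample_list decision_func_params_0 decision_func_params_1 (classification i_sample_list q_sample_list decision_func_params_0 decision_func_params_1)

-- ===== LEMMAS AND PROOFS =====

-- A's four-way branch appends exactly the arithmetic class index B computes.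
theorem pvStep (acc : List Int) (r0 r1 : Int) :
    (if r0 ≥ 0 ∧ r1 ≥ 0 then acc ++ [0]
     else if r0 ≥ 0 ∧ r1 < 0 then acc ++ [1]
     else if r0 < 0 ∧ r1 ≥ 0 then acc ++ [2]
     else if r0 < 0 ∧ r1 < 0 then acc ++ [3]
     else acc)
    = acc ++ [2 * (if r0 < 0 then (1 : Int) else 0) + (if r1 < 0 then (1 : Int) else 0)] := by
  rcases lt_or_ge r0 0 with h0 | h0 <;> rcases lt_or_ge r1 0 with h1 | h1 <;>
    simp only [ge_iff_le] <;>
    split_ifs <;> first | rfl | omega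

-- A's accumulating fold over any index list equals acc ++ the per-index class values.
theorem pvFold_eq (i_sample_list q_sample_list : List Int) (a0 b0 c0 a1 b1 c1 : Int)
    (l : List Int) (acc : List Int) :
    l.foldl
      (fun result i =>
        if a0 * (PySem.List.pyGet? i_sample_list i).getD 0
             + b0 * (PySem.List.pyGet? q_sample_list i).getD 0 + c0 ≥ 0
           ∧ a1 * (PySem.List.pyGet? i_sample_list i).getD 0
             + b1 * (PySem.List.pyGet? q_sample_list i).getD 0 + c1 ≥ 0 then result ++ [0]
        else if a0 * (PySem.List.pyGet? i_sample_list i).getD 0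
             + b0 * (PySem.List.pyGet? q_sample_list i).getD 0 + c0 ≥ 0
           ∧ a1 * (PySem.List.pyGet? i_sample_list i).getD 0
             + b1 * (PySem.List.pyGet? q_sample_list i).getD 0 + c1 < 0 then result ++ [1]
        else if a0 * (PySem.List.pyGet? i_sample_list i).getD 0
             + b0 * (PySem.List.pyGet? q_sample_list i).getD 0 + c0 < 0
           ∧ a1 * (PySem.List.pyGet? i_sample_list i).getD 0
             + b1 * (PySem.List.pyGet? q_sample_list i).getD 0 + c1 ≥ 0 then result ++ [2]
        else if a0 * (PySem.List.pyGet? i_sample_list i).getD 0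
             + b0 * (PySem.List.pyGet? q_sample_list i).getD 0 + c0 < 0
           ∧ a1 * (PySem.List.pyGet? i_sample_list i).getD 0
             + b1 * (PySem.List.pyGet? q_sample_list i).getD 0 + c1 < 0 then result ++ [3]
        else result) acc
    = acc ++ l.map (fun k =>
        2 * (if a0 * (PySem.List.pyGet? i_sample_list k).getD 0
               + b0 * (PySem.List.pyGet? q_sample_list k).getD 0 + c0 < 0 then (1 : Int) else 0)
          + (if a1 * (PySem.List.pyGet? i_sample_list k).getD 0
               + b1 * (PySem.List.pyGet? q_sample_list k).getD 0 + c1 < 0 then (1 : Int) else 0)) := by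
  induction l generalizing acc with
  | nil => simp
  | cons x xs ih =>
    simp only [List.foldl_cons, List.map_cons]
    rw [pvStep, ih]
    simp

theorem classification_eq_alt (i_sample_list q_sample_list : List Int)
    (p0 p1 : Int × Int × Int) :
    classification i_sample_list q_sample_list p0 p1
      = classification_alt i_sample_list q_sample_list p0 p1 := by
  simp only [classification, classification_alt, pvNegatives]
  rw [pvFold_eq]
  simp [List.zip_map']

-- ===== VERDICT (by name: the statement is the Claim_ definition above) =====
theorem classification_spec : Claim_equal_classification := by
  intro i q p0 p1 _ _
  unfold Spec_classification
  exact classification_eq_alt i q p0 p1
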